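-- pv_equiv track=rewrite | github.com/dadebeats/lol-nlp-prediction | asr/test_and_choose_gpt_model.py | consolidate_corrections
-- ===== SOURCE A (Python) =====
-- from collections import Counter, defaultdict
-- from typing import List, Tuple, Dict
--
-- def consolidate_corrections(
--     corrections: List[Tuple[str, str]]
-- ) -> List[Tuple[str, str]]:
--     """
--     Resolve multiple corrections for the same source string by majority vote.
--     Ties are broken by last occurrence. Longer source strings are applied first.
--     """
--     by_from = defaultdict(list)
--     for frm, to in corrections:
--         if frm and to and frm != to:
--             by_from[frm].append(to)
--
--     final = []
--     for frm, tos in by_from.items():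
--         counts = Counter(tos)
--         max_freq = max(counts.values())
--         candidates = {t for t, c in counts.items() if c == max_freq}
--         for t in reversed(tos):
--             if t in candidates:
--                 final.append((frm, t))
--                 break
--
--     final.sort(key=lambda p: len(p[0]), reverse=True)
--     return final
-- ===== SOURCE B (Python) =====
-- from collections import defaultdict
--
-- def consolidate_corrections(corrections):
--     # One streaming pass per group: running (best, bestc) argmax replaces
--     # Counter + max + candidate-set + reversed scan.
--     by_from = defaultdict(list)
--     for frm, to in corrections:
--         if frm and to and frm != to:
--             by_from[frm].append(to)
--
--     final = []
--     for frm, tos in by_from.items():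
--         counts = {}
--         best, bestc = "", 0
--         for t in tos:
--             c = counts.get(t, 0) + 1
--             counts[t] = c
--             if c >= bestc:
--                 best, bestc = t, c
--         final.append((frm, best))
--
--     final.sort(key=lambda p: len(p[0]), reverse=True)
--     return final
-- ===== Notes on version B (the rewrite author's own statement) =====
-- stated objective: alternative
-- what changed: Per-group winner selection replaced: instead of Counter + max + candidate-set + reversed scan, one streaming pass keeps a running (best, bestc) argmax (update on count >= bestc), which realises the same majority-with-last-occurrence tie-break; the grouping loop and final length-descending stable sort are kept.
import Mathlib
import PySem

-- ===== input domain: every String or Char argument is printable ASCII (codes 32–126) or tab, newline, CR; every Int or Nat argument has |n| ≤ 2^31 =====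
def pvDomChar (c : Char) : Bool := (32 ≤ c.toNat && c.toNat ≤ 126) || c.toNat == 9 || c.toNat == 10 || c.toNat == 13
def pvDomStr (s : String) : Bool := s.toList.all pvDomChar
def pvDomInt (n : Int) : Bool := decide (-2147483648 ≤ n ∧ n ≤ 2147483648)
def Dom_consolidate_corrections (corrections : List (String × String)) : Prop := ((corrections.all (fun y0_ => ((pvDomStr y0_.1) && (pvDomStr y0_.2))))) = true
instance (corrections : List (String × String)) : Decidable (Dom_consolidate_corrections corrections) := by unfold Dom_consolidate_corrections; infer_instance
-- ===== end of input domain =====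

-- B replaces A's per-group Counter + max + candidate-set + reversed-scan selection by a single
-- streaming pass with a running (best, bestc) argmax; same grouping loop and same final stable sort.
-- A only mutates its local list (final.sort), never its argument.

-- ===== PORT A =====
def consolidate_corrections (corrections : List (String × String)) : List (String × String) :=
  -- by_from = defaultdict(list); for frm, to in corrections: if frm and to and frm != to: by_from[frm].append(to)
  let by_from : PySem.Dict String (List String) :=
    corrections.foldl (fun d p =>
      if p.1 ≠ "" ∧ p.2 ≠ "" ∧ p.1 ≠ p.2 then d.modify p.1 [] (fun x => x ++ [p.2]) else d)
      PySem.Dict.empty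
  let final : List (String × String) :=
    by_from.items.foldl (fun final g =>
      let counts : PySem.Dict String Int := PySem.Dict.counter g.2
      let max_freq : Int := (PySem.List.max? counts.values (fun v => v)).getD 0
      let candidates : PySem.Set String :=
        PySem.Set.ofList ((counts.items.filter (fun tc => tc.2 == max_freq)).map (fun tc => tc.1))
      -- for t in reversed(tos): if t in candidates: final.append((frm, t)); break
      match g.2.reverse.find? (fun t => PySem.Set.contains candidates t) with
      | some t => final ++ [(g.1, t)]
      | none => final) []
  PySem.List.sorted final (fun p => PySem.Str.len p.1) true

-- ===== PORT B =====
def consolidate_corrections_alt (corrections : List (String × String)) : List (String × String) :=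
  let by_from : PySem.Dict String (List String) :=
    corrections.foldl (fun d p =>
      if p.1 ≠ "" ∧ p.2 ≠ "" ∧ p.1 ≠ p.2 then d.modify p.1 [] (fun x => x ++ [p.2]) else d)
      PySem.Dict.empty
  let final : List (String × String) :=
    by_from.items.foldl (fun final g =>
      -- counts = {}; best, bestc = "", 0
      -- for t in tos: c = counts.get(t, 0) + 1; counts[t] = c; if c >= bestc: best, bestc = t, c
      let r := g.2.foldl (fun st t =>
          let c : Int := st.1.getD t 0 + 1
          let counts := st.1.insert t c
          if st.2.2 ≤ c then (counts, t, c) else (counts, st.2.1, st.2.2))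
        ((PySem.Dict.empty : PySem.Dict String Int), "", (0 : Int))
      final ++ [(g.1, r.2.1)]) []
  PySem.List.sorted final (fun p => PySem.Str.len p.1) true

-- ===== PRECONDITION & SPEC =====
def Spec_consolidate_corrections (corrections : List (String × String)) (out : List (String × String)) : Prop := out = consolidate_corrections_alt corrections
instance (corrections : List (String × String)) (out : List (String × String)) : Decidable (Spec_consolidate_corrections corrections out) := by unfold Spec_consolidate_corrections; infer_instance

-- ===== CLAIM (what is proved, stated in full; the proofs are below) =====
def Claim_equal_consolidate_corrections : Prop := ∀ (corrections : List (String × String)), Dom_consolidate_corrections corrections → Spec_consolidate_corrections corrections (consolidate_corrections corrections)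

-- ===== LEMMAS AND PROOFS =====

-- B's streaming step (the lambda inside consolidate_corrections_alt's inner fold)
def pvBStep (st : PySem.Dict String Int × String × Int) (t : String) :
    PySem.Dict String Int × String × Int :=
  let c : Int := st.1.getD t 0 + 1
  let counts := st.1.insert t c
  if st.2.2 ≤ c then (counts, t, c) else (counts, st.2.1, st.2.2)

def pvBInit : PySem.Dict String Int × String × Int := (PySem.Dict.empty, "", 0)

lemma pv_find?_congr_mem {α : Type} (l : List α) (p q : α → Bool)
    (h : ∀ x ∈ l, p x = q x) : l.find? p = l.find? q := by
  induction l with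
  | nil => rfl
  | cons a t ih =>
    simp only [List.find?_cons]
    rw [h a (by simp)]
    cases q a with
    | true => rfl
    | false => exact ih (fun x hx => h x (by simp [hx]))

-- Streaming invariant: counts tracks occurrence counts, bestc is the running max count,
-- and best is exactly the element A's reversed scan over the max-count candidates finds.
lemma pv_stream_inv (tos : List String) :
    (∀ x, (tos.foldl pvBStep pvBInit).1.getD x 0 = (tos.count x : Int)) ∧
    (∀ x, (tos.count x : Int) ≤ (tos.foldl pvBStep pvBInit).2.2) ∧
    (tos ≠ [] →
      (tos.count (tos.foldl pvBStep pvBInit).2.1 : Int) = (tos.foldl pvBStep pvBInit).2.2 ∧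
      (tos.foldl pvBStep pvBInit).2.1 ∈ tos ∧
      tos.reverse.find?
          (fun u => decide ((tos.count u : Int) = (tos.foldl pvBStep pvBInit).2.2))
        = some (tos.foldl pvBStep pvBInit).2.1) := by
  induction tos using List.reverseRecOn with
  | nil =>
    refine ⟨fun x => by simp [pvBInit], fun x => by simp [pvBInit], fun h => absurd rfl h⟩
  | append_singleton ys t ih =>
    obtain ⟨ih1, ih2, ih3⟩ := ih
    rw [List.foldl_append]
    simp only [List.foldl_cons, List.foldl_nil]
    set S := ys.foldl pvBStep pvBInit with hS
    have hc : S.1.getD t 0 = (ys.count t : Int) := ih1 t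
    have hcount : ∀ x, ((ys ++ [t]).count x : Int)
        = (ys.count x : Int) + (if x = t then 1 else 0) := by
      intro x
      rw [List.count_append]
      push_cast
      by_cases hx : x = t
      · simp [hx]
      · simp [hx, Ne.symm hx]
    have hrev : (ys ++ [t]).reverse = t :: ys.reverse := by simp
    by_cases hb : S.2.2 ≤ S.1.getD t 0 + 1
    · have hstep : pvBStep S t = (S.1.insert t (S.1.getD t 0 + 1), t, S.1.getD t 0 + 1) := by
        simp only [pvBStep]; rw [if_pos hb]
      simp only [hstep]
      have hct : ((ys ++ [t]).count t : Int) = S.1.getD t 0 + 1 := by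
        rw [hcount t, hc]; simp
      refine ⟨?_, ?_, fun _ => ⟨hct, by simp, ?_⟩⟩
      · intro x
        rw [PySem.Dict.getD_insert, hcount x]
        by_cases hx : x = t
        · simp [hx, hc]
        · simp [hx, ih1 x]
      · intro x
        rw [hcount x]
        by_cases hx : x = t
        · simp [hx, hc]
        · have h1 := ih2 x
          have h2 := hb
          simp only [hx, if_false]
          omega
      · rw [hrev]
        apply List.find?_cons_of_pos
        simp only [decide_eq_true_eq]
        exact hct
    · have hstep : pvBStep S t = (S.1.insert t (S.1.getD t 0 + 1), S.2.1, S.2.2) := by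
        simp only [pvBStep]; rw [if_neg hb]
      simp only [hstep]
      have hys : ys ≠ [] := by
        rintro rfl
        rw [hS] at hb
        simp only [List.foldl_nil, pvBInit] at hb
        rw [PySem.Dict.getD_empty] at hb
        omega
      obtain ⟨h1, h2, h3⟩ := ih3 hys
      have hlt : (ys.count t : Int) + 1 < S.2.2 := by
        have := lt_of_not_ge hb
        rw [hc] at this
        exact this
      refine ⟨?_, ?_, fun _ => ⟨?_, ?_, ?_⟩⟩
      · intro x
        rw [PySem.Dict.getD_insert, hcount x]
        by_cases hx : x = t
        · simp [hx, hc]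
        · simp [hx, ih1 x]
      · intro x
        rw [hcount x]
        by_cases hx : x = t
        · subst hx
          simp only [if_pos]
          omega
        · have := ih2 x
          simp only [hx, if_false]
          omega
      · have hbt : S.2.1 ≠ t := by
          intro he
          rw [he] at h1
          omega
        rw [hcount S.2.1, if_neg hbt, h1]
        simp
      · exact List.mem_append_left _ h2
      · rw [hrev]
        rw [List.find?_cons_of_neg]
        · rw [pv_find?_congr_mem ys.reverse _
            (fun u => decide ((ys.count u : Int) = S.2.2))]
          · exact h3
          · intro u hu
            by_cases hut : u = t
            · subst hut
              have c1 : ¬ (((ys ++ [u]).count u : Int) = S.2.2) := by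
                rw [hcount u]
                simp only [if_pos]
                omega
              have c2 : ¬ ((ys.count u : Int) = S.2.2) := by omega
              rw [decide_eq_false c1, decide_eq_false c2]
            · rw [hcount u, if_neg hut]
              simp
        · simp only [decide_eq_true_eq]
          rw [hcount t]
          simp only [if_pos]
          omega

-- Per nonempty group: A's selection equals B's streaming best.
lemma pv_group_eq (tos : List String) (h : tos ≠ []) :
    (let counts : PySem.Dict String Int := PySem.Dict.counter tos
     let max_freq : Int := (PySem.List.max? counts.values (fun v => v)).getD 0
     let candidates : PySem.Set String :=
       PySem.Set.ofList ((counts.items.filter (fun tc => tc.2 == max_freq)).map (fun tc => tc.1))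
     tos.reverse.find? (fun t => PySem.Set.contains candidates t))
    = some ((tos.foldl pvBStep pvBInit).2.1) := by
  obtain ⟨i1, i2, i3⟩ := pv_stream_inv tos
  obtain ⟨hbc, hbm, hfind⟩ := i3 h
  have hvals : (PySem.Dict.counter tos).values
      = (PySem.Set.ofList tos).map (fun k => ((tos.count k : Nat) : Int)) := by
    rw [show (PySem.Dict.counter tos).values
        = ((PySem.Dict.counter tos).items).map (fun p => p.2) from rfl]
    rw [PySem.Dict.items_counter]
    rw [List.map_map]
    rfl
  cases hm : PySem.List.max? (PySem.Dict.counter tos).values (fun v => v) with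
  | none =>
    exfalso
    rw [PySem.List.max?_eq_none_iff, hvals, List.map_eq_nil_iff] at hm
    obtain ⟨a, ha⟩ := List.exists_mem_of_ne_nil tos h
    have : a ∈ PySem.Set.ofList tos := (PySem.Set.mem_ofList tos a).mpr ha
    rw [hm] at this
    exact absurd this (List.not_mem_nil)
  | some m =>
    have hmem := PySem.List.max?_mem hm
    have hmax := PySem.List.max?_isMax hm
    rw [hvals] at hmem
    obtain ⟨k, hk, hkm⟩ := List.mem_map.mp hmem
    have hkt : k ∈ tos := (PySem.Set.mem_ofList tos k).mp hk
    have hmb : m = (tos.foldl pvBStep pvBInit).2.2 := by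
      apply le_antisymm
      · rw [← hkm]; exact i2 k
      · rw [← hbc]
        apply hmax
        rw [hvals]
        exact List.mem_map.mpr ⟨_, (PySem.Set.mem_ofList tos _).mpr hbm, rfl⟩
    simp only [hm, Option.getD_some]
    rw [pv_find?_congr_mem tos.reverse _
      (fun u => decide ((tos.count u : Int) = (tos.foldl pvBStep pvBInit).2.2))]
    · exact hfind
    · intro u hu
      have hut : u ∈ tos := List.mem_reverse.mp hu
      rw [Bool.eq_iff_iff, PySem.Set.contains_iff, PySem.Set.mem_ofList, decide_eq_true_eq]
      constructor
      · intro hin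
        obtain ⟨tc, htc, htcu⟩ := List.mem_map.mp hin
        have := List.mem_filter.mp htc
        obtain ⟨htc1, htc2⟩ := this
        rw [PySem.Dict.items_counter] at htc1
        obtain ⟨k', hk', hk'e⟩ := List.mem_map.mp htc1
        rw [← hk'e] at htc2 htcu
        simp only [beq_iff_eq] at htc2
        simp only at htc2 htcu
        rw [← hmb, ← htc2, ← htcu]
      · intro hcnt
        apply List.mem_map.mpr
        refine ⟨(u, ((tos.count u : Nat) : Int)), ?_, rfl⟩
        apply List.mem_filter.mpr
        constructor
        · rw [PySem.Dict.items_counter]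
          exact List.mem_map.mpr ⟨u, (PySem.Set.mem_ofList tos u).mpr hut, rfl⟩
        · simp only [beq_iff_eq]
          rw [hcnt, hmb]

-- Every group list produced by the grouping loop is nonempty.
lemma pv_groups_nonempty (corrections : List (String × String)) (g : String × List String)
    (hg : g ∈ (corrections.foldl (fun d p =>
        if p.1 ≠ "" ∧ p.2 ≠ "" ∧ p.1 ≠ p.2 then d.modify p.1 [] (fun x => x ++ [p.2]) else d)
        (PySem.Dict.empty : PySem.Dict String (List String))).items) : g.2 ≠ [] := by
  have heq : (corrections.foldl (fun d p =>
        if p.1 ≠ "" ∧ p.2 ≠ "" ∧ p.1 ≠ p.2 then d.modify p.1 [] (fun x => x ++ [p.2]) else d)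
        (PySem.Dict.empty : PySem.Dict String (List String)))
      = (corrections.filter (fun p => decide (p.1 ≠ "" ∧ p.2 ≠ "" ∧ p.1 ≠ p.2))).foldl
        (fun d p => d.modify p.1 [] (fun x => x ++ [p.2])) PySem.Dict.empty :=
    PySem.List.foldl_ite_eq_foldl_filter
      (fun p : String × String => p.1 ≠ "" ∧ p.2 ≠ "" ∧ p.1 ≠ p.2)
      (fun d p => d.modify p.1 [] (fun x => x ++ [p.2])) corrections PySem.Dict.empty
  rw [heq] at hg
  set l := corrections.filter (fun p => decide (p.1 ≠ "" ∧ p.2 ≠ "" ∧ p.1 ≠ p.2)) with hl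
  have hnd : (l.foldl (fun d p => d.modify p.1 [] (fun x => x ++ [p.2]))
      (PySem.Dict.empty : PySem.Dict String (List String))).keys.Nodup := by
    exact PySem.Dict.nodup_keys_foldl_modify_key l (fun p => p.1) [] (fun _ p x => x ++ [p.2])
      PySem.Dict.empty (by simp)
  obtain ⟨k, v⟩ := g
  have hval : (l.foldl (fun d p => d.modify p.1 [] (fun x => x ++ [p.2]))
      (PySem.Dict.empty : PySem.Dict String (List String))).getD k [] = v :=
    PySem.Dict.getD_of_mem_items _ hg hnd []
  rw [PySem.Dict.getD_foldl_modify_append] at hval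
  have hkey : k ∈ (l.foldl (fun d p => d.modify p.1 [] (fun x => x ++ [p.2]))
      (PySem.Dict.empty : PySem.Dict String (List String))).keys :=
    PySem.Dict.mem_keys_of_mem_items _ hg
  rw [PySem.Dict.keys_foldl_modify_key l (fun p => p.1) [] (fun _ p x => x ++ [p.2])] at hkey
  have : k ∈ l.map (fun p => p.1) := by
    have : PySem.Set.update (PySem.Dict.empty : PySem.Dict String (List String)).keys
        (l.map fun p => p.1) = PySem.Set.ofList (l.map fun p => p.1) := by
      rw [PySem.Set.ofList_eq_foldl]; rfl
    rw [this, PySem.Set.mem_ofList] at hkey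
    exact hkey
  obtain ⟨p, hp, hpk⟩ := List.mem_map.mp this
  intro hv
  change v = [] at hv
  rw [hv] at hval
  simp only [PySem.Dict.getD_empty, List.nil_append, List.map_eq_nil_iff, List.filter_eq_nil_iff] at hval
  exact hval p hp (by simp [hpk])

-- ===== VERDICT (by name: the statement is the Claim_ definition above) =====
theorem consolidate_corrections_spec : Claim_equal_consolidate_corrections := by
  intro corrections _
  unfold Spec_consolidate_corrections
  simp only [consolidate_corrections, consolidate_corrections_alt]
  congr 1
  apply PySem.List.foldl_congr_mem
  intro acc g hg
  have hne := pv_groups_nonempty corrections g hg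
  have := pv_group_eq g.2 hne
  simp only at this
  rw [show (g.2.foldl (fun st t =>
          let c : Int := st.1.getD t 0 + 1
          let counts := st.1.insert t c
          if st.2.2 ≤ c then (counts, t, c) else (counts, st.2.1, st.2.2))
        ((PySem.Dict.empty : PySem.Dict String Int), "", (0 : Int)))
      = g.2.foldl pvBStep pvBInit from rfl]
  rw [this]
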